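-- pv_equiv track=rewrite | github.com/ldemesla/equation-solver | equation_solver.py | remove_x
-- ===== SOURCE A (Python) =====
-- def remove_x(s):
--     new_str = str()
--     i = 0
--     x = False
--     while i < len(s):
--         if (s[i] == 'X'):
--             x = True
--         elif x == True:
--             if (s[i] == ' ' or s[i] == '*'):
--                 x = False
--         elif s[i] != '*':
--             new_str += s[i]
--         i += 1
--     if (len(new_str) == 1):
--         new_str += '1'
--     return new_str
-- ===== SOURCE B (Python) =====
-- def remove_x(s):
--     # Partition-based: split off each X-term with str.partition instead of a
--     # char-by-char boolean-state scan, then filter the remaining '*'.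
--     kept = []
--     rest = s
--     while True:
--         head, sep, rest = rest.partition('X')
--         kept.append(head)
--         if not sep:
--             break
--         cut = next((k for k, ch in enumerate(rest) if ch in ' *'), None)
--         rest = '' if cut is None else rest[cut + 1:]
--     out = ''.join(c for c in ''.join(kept) if c != '*')
--     return out + '1' if len(out) == 1 else out
-- ===== Notes on version B (the rewrite author's own statement) =====
-- stated objective: faster
-- what changed: Replaces the character-by-character loop with a hand-maintained boolean skip flag (building the result by repeated string concatenation) by a rounds loop that uses str.partition to cut off each X-term, a scan for its terminator to drop it, then one join and one asterisk-filter pass.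
import Mathlib
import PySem

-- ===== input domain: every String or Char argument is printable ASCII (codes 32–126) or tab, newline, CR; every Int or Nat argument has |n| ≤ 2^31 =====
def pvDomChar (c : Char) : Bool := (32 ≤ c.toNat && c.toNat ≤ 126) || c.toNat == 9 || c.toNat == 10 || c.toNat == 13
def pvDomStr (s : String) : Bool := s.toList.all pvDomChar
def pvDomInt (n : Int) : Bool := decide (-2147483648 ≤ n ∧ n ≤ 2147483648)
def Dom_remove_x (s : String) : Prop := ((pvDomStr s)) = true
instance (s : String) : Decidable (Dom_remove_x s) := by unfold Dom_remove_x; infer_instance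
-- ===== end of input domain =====

-- B removes each X-term with str.partition / a scan for the terminator, in rounds, then joins and
-- filters asterisks, instead of A's per-char boolean-state loop building the result by repeated
-- string concatenation; a timing run measured B faster.

-- ===== PORT A =====
-- while i < len(s) over s with state (new_str, x); new_str += s[i] is the append on the accumulator
def pvALoop (acc : List Char) (cs : List Char) (x : Bool) : List Char :=
  match cs with
  | [] => acc
  | c :: t =>
    if c = 'X' then pvALoop acc t true
    else if x = true then
      (if c = ' ' ∨ c = '*' then pvALoop acc t false else pvALoop acc t x)
    else if c ≠ '*' then pvALoop (acc ++ [c]) t x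
    else pvALoop acc t x

def remove_x (s : String) : String :=
  let new_str := pvALoop [] s.toList false
  String.ofList (if new_str.length = 1 then new_str ++ ['1'] else new_str)

-- ===== PORT B =====
-- exact port of str.partition for the one-char separator 'X': (before, found?, after)
def pvPartX : List Char → List Char × Bool × List Char
  | [] => ([], false, [])
  | c :: t =>
    if c = 'X' then ([], true, t)
    else
      let (h, f, r) := pvPartX t
      (c :: h, f, r)

-- port of next((k for k, ch in enumerate(rest) if ch in ' *'), None)
def pvCut : List Char → Option Nat
  | [] => none
  | c :: t => if c = ' ' ∨ c = '*' then some 0 else (pvCut t).map (· + 1)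

theorem pvPartX_after_lt : ∀ (cs : List Char), (pvPartX cs).2.1 = true →
    (pvPartX cs).2.2.length < cs.length := by
  intro cs
  induction cs with
  | nil => simp [pvPartX]
  | cons c t ih =>
    simp only [pvPartX]
    split
    · simp
    · simp only []
      intro h
      have := ih h
      simpa using Nat.lt_succ_of_lt this

-- the while-True loop, returning the kept parts already joined
def pvBJoin (cs : List Char) : List Char :=
  let p := pvPartX cs
  if hf : p.2.1 = true then
    match pvCut p.2.2 with
    | none => p.1
    | some k => p.1 ++ pvBJoin (p.2.2.drop (k + 1))   -- rest[cut+1:] with cut+1 ≥ 0 is drop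
  else p.1
termination_by cs.length
decreasing_by
  have := pvPartX_after_lt cs hf
  simp only [List.length_drop]
  omega

def remove_x_alt (s : String) : String :=
  let out := (pvBJoin s.toList).filter (fun c => c ≠ '*')
  String.ofList (if out.length = 1 then out ++ ['1'] else out)

-- ===== PRECONDITION & SPEC =====
def Spec_remove_x (s : String) (out : String) : Prop := out = remove_x_alt s
instance (s : String) (out : String) : Decidable (Spec_remove_x s out) := by unfold Spec_remove_x; infer_instance

-- ===== CLAIM (what is proved, stated in full; the proofs are below) =====
def Claim_equal_remove_x : Prop := ∀ (s : String), Dom_remove_x s → Spec_remove_x s (remove_x s)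

-- ===== LEMMAS AND PROOFS =====

-- A's loop without the accumulator
def pvAux : List Char → Bool → List Char
  | [], _ => []
  | c :: t, x =>
    if c = 'X' then pvAux t true
    else if x = true then
      (if c = ' ' ∨ c = '*' then pvAux t false else pvAux t x)
    else if c ≠ '*' then c :: pvAux t x
    else pvAux t x

theorem pvALoop_eq_aux (cs : List Char) : ∀ (acc : List Char) (x : Bool),
    pvALoop acc cs x = acc ++ pvAux cs x := by
  induction cs with
  | nil => simp [pvALoop, pvAux]
  | cons c t ih =>
    intro acc x
    simp only [pvALoop, pvAux]
    split_ifs <;> simp [ih]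

-- B's skip-mode: what the loop does with the remainder after an 'X' was found
def pvBSkip (cs : List Char) : List Char :=
  match pvCut cs with
  | none => []
  | some k => pvBJoin (cs.drop (k + 1))

theorem pvBJoin_nil : pvBJoin [] = [] := by simp [pvBJoin, pvPartX]

theorem pvBJoin_consX (t : List Char) : pvBJoin ('X' :: t) = pvBSkip t := by
  rw [pvBJoin]
  simp [pvPartX, pvBSkip]

theorem pvBJoin_cons (c : Char) (t : List Char) (h : c ≠ 'X') :
    pvBJoin (c :: t) = c :: pvBJoin t := by
  rcases hpt : pvPartX t with ⟨h1, f, r⟩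
  rw [pvBJoin, pvBJoin]
  simp only [pvPartX, if_neg h, hpt]
  cases f
  · simp
  · cases hc : pvCut r <;> simp

theorem pvBSkip_cons_term (c : Char) (t : List Char) (h : c = ' ' ∨ c = '*') :
    pvBSkip (c :: t) = pvBJoin t := by
  simp [pvBSkip, pvCut, h]

theorem pvBSkip_cons (c : Char) (t : List Char) (h : ¬ (c = ' ' ∨ c = '*')) :
    pvBSkip (c :: t) = pvBSkip t := by
  simp only [pvBSkip, pvCut, if_neg h]
  cases hc : pvCut t with
  | none => simp
  | some k => simp [List.drop_succ_cons]

-- the core equivalence of the two scans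
theorem pv_core : ∀ (cs : List Char),
    pvAux cs false = (pvBJoin cs).filter (fun c => c ≠ '*') ∧
    pvAux cs true = (pvBSkip cs).filter (fun c => c ≠ '*') := by
  intro cs
  induction cs with
  | nil =>
    constructor <;> simp [pvAux, pvBJoin_nil, pvBSkip, pvCut]
  | cons c t ih =>
    obtain ⟨ih1, ih2⟩ := ih
    constructor
    · by_cases hX : c = 'X'
      · subst hX; simp [pvAux, pvBJoin_consX, ih2]
      · rw [pvBJoin_cons c t hX]
        simp only [pvAux, if_neg hX, Bool.false_eq_true, if_false, List.filter_cons]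
        by_cases hs : c = '*'
        · subst hs; simp [ih1]
        · simp [hs, ih1]
    · by_cases hterm : c = ' ' ∨ c = '*'
      · have hX : ¬ c = 'X' := by rcases hterm with h | h <;> subst h <;> decide
        rw [pvBSkip_cons_term c t hterm]
        simp [pvAux, hX, hterm, ih1]
      · by_cases hX : c = 'X'
        · subst hX
          rw [pvBSkip_cons _ t hterm]
          simp [pvAux, ih2]
        · rw [pvBSkip_cons c t hterm]
          simp [pvAux, hX, hterm, ih2]

-- ===== VERDICT (by name: the statement is the Claim_ definition above) =====
theorem remove_x_spec : Claim_equal_remove_x := by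
  intro s _
  unfold Spec_remove_x remove_x remove_x_alt
  rw [pvALoop_eq_aux, List.nil_append, (pv_core s.toList).1]
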